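-- pv_equiv track=rewrite | github.com/fanhillary/shop-better | scrape.py | build_css_selector
-- ===== SOURCE A (Python) =====
-- def build_css_selector(important, ignore):
--     selector = ""
--     for word in important:
--         selector += "[class*='" + word + "']"
--         for word in ignore:
--             selector += ":not([class*='" + word + "'])"
--         selector += ", "
--
--     return selector[:-2]
-- ===== SOURCE B (Python) =====
-- def build_css_selector(important, ignore):
--     # View the result as: prefix + (words joined by one composite separator) + tail.
--     # The separator closes the previous clause, appends the ignore suffix, and opens the next.
--     if not important:
--         return ""
--     suffix = "".join(":not([class*='" + w + "'])" for w in ignore)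
--     sep = "']" + suffix + ", [class*='"
--     return "[class*='" + sep.join(important) + "']" + suffix
-- ===== Notes on version B (the rewrite author's own statement) =====
-- stated objective: alternative
-- what changed: Replaces A's nested accumulate-per-word loop (with trailing ', ' sliced off) by an assembly with no per-word piece construction at all: the raw important words are joined once with a single composite separator (close-bracket + ignore suffix + comma + open-bracket) and wrapped in one prefix and one tail.
import Mathlib
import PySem

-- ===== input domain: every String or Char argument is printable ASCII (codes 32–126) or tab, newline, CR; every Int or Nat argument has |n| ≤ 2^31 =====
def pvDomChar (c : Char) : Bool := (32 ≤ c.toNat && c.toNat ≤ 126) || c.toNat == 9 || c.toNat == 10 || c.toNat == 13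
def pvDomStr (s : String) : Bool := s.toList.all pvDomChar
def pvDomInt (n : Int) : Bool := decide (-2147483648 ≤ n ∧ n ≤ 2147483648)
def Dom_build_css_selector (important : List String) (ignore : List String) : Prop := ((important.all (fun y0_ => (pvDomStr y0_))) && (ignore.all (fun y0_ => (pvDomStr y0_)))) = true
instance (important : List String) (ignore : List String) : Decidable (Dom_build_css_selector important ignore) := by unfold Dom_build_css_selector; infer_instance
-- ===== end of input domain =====

-- B builds no per-word piece: it joins the raw important words with one composite separator ("']" + ignore suffix + ", [class*='") and adds one prefix and tail; same output.

-- ===== PORT A =====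
-- A: accumulate selector over important, rebuilding the :not(...) suffix inside the loop, append ", " each round, finally selector[:-2].
def build_css_selector (important : List String) (ignore : List String) : String :=
  String.mk (PySem.List.slice
    (important.foldl (fun selector word =>
      let selector := selector ++ "[class*='".toList ++ word.toList ++ "']".toList
      let selector := ignore.foldl (fun selector w =>
        selector ++ ":not([class*='".toList ++ w.toList ++ "'])".toList) selector
      selector ++ ", ".toList) [])
    none (some (-2)))

-- ===== PORT B =====
-- B: if important empty return ""; else suffix once, sep = "']" + suffix + ", [class*='", result = "[class*='" + sep.join(important) + "']" + suffix.
def build_css_selector_alt (important : List String) (ignore : List String) : String :=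
  match important with
  | [] => ""
  | _ =>
    let suffix : List Char :=
      (ignore.map (fun w => ":not([class*='".toList ++ w.toList ++ "'])".toList)).flatten
    let sep : List Char := "']".toList ++ suffix ++ ", [class*='".toList
    String.mk ("[class*='".toList ++ List.intercalate sep (important.map String.toList)
      ++ "']".toList ++ suffix)

-- ===== PRECONDITION & SPEC =====
def Spec_build_css_selector (important : List String) (ignore : List String) (out : String) : Prop := out = build_css_selector_alt important ignore
instance (important : List String) (ignore : List String) (out : String) : Decidable (Spec_build_css_selector important ignore out) := by unfold Spec_build_css_selector; infer_instance

-- ===== CLAIM (what is proved, stated in full; the proofs are below) =====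
def Claim_equal_build_css_selector : Prop := ∀ (important : List String) (ignore : List String), Dom_build_css_selector important ignore → Spec_build_css_selector important ignore (build_css_selector important ignore)

-- ===== LEMMAS AND PROOFS =====

-- intercalate on a list of ≥ 2 pieces peels off 'head ++ sep'.
theorem intercalate_cons₂ (sep x y : List Char) (ys : List (List Char)) :
    List.intercalate sep (x :: y :: ys) = x ++ sep ++ List.intercalate sep (y :: ys) := by
  simp [List.intercalate, List.intersperse]

-- A's inner ignore-loop appends exactly the ignore suffix.
theorem inner_loop_eq (ignore : List String) (s : List Char) :
    ignore.foldl (fun selector w =>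
        selector ++ ":not([class*='".toList ++ w.toList ++ "'])".toList) s
      = s ++ (ignore.map (fun w => ":not([class*='".toList ++ w.toList ++ "'])".toList)).flatten := by
  induction ignore generalizing s with
  | nil => simp
  | cons w ws ih =>
    rw [List.foldl_cons, ih]
    simp [List.append_assoc]

-- A's outer loop flattens the per-word items, each followed by ", ".
theorem outer_loop_eq (ignore : List String) (important : List String) (s : List Char) :
    important.foldl (fun selector word =>
        let selector := selector ++ "[class*='".toList ++ word.toList ++ "']".toList
        let selector := ignore.foldl (fun selector w =>
          selector ++ ":not([class*='".toList ++ w.toList ++ "'])".toList) selector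
        selector ++ ", ".toList) s
      = s ++ (important.map (fun word =>
          "[class*='".toList ++ word.toList ++ "']".toList
            ++ (ignore.map (fun w => ":not([class*='".toList ++ w.toList ++ "'])".toList)).flatten
            ++ ", ".toList)).flatten := by
  induction important generalizing s with
  | nil => simp
  | cons w ws ih =>
    simp only [List.foldl_cons, List.map_cons, List.flatten_cons]
    rw [ih, inner_loop_eq]
    simp [List.append_assoc]

-- Flattening items each followed by ", " is the ", "-intercalation plus one trailing ", ".
theorem flatten_sep_eq (f : String → List Char) (l : List String) (hl : l ≠ []) :
    (l.map (fun x => f x ++ ", ".toList)).flatten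
      = List.intercalate ", ".toList (l.map f) ++ ", ".toList := by
  induction l with
  | nil => simp at hl
  | cons x xs ih =>
    cases xs with
    | nil => simp [List.intercalate]
    | cons y ys =>
      rw [List.map_cons, List.flatten_cons, ih (by simp),
        show List.map f (x :: y :: ys) = f x :: f y :: List.map f ys from by simp,
        intercalate_cons₂]
      simp [List.append_assoc]

-- ", "-intercalating wrapped words equals wrapping once around a composite-separator intercalation of the raw words.
theorem intercalate_map_wrap (pre post : List Char) (x : String) (xs : List String) :
    List.intercalate ", ".toList ((x :: xs).map (fun w => pre ++ w.toList ++ post))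
      = pre ++ List.intercalate (post ++ ", ".toList ++ pre) ((x :: xs).map String.toList) ++ post := by
  induction xs generalizing x with
  | nil => simp [List.intercalate]
  | cons y ys ih =>
    have h := ih y
    simp only [List.map_cons] at h ⊢
    rw [intercalate_cons₂, h, intercalate_cons₂]
    simp [List.append_assoc]

theorem build_css_selector_eq (important ignore : List String) :
    build_css_selector important ignore = build_css_selector_alt important ignore := by
  unfold build_css_selector build_css_selector_alt
  rw [outer_loop_eq, List.nil_append]
  cases important with
  | nil => simp [PySem.List.slice]; rfl
  | cons w ws =>
    rw [show (((w :: ws).map (fun word =>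
          "[class*='".toList ++ word.toList ++ "']".toList
            ++ (ignore.map (fun w => ":not([class*='".toList ++ w.toList ++ "'])".toList)).flatten
            ++ ", ".toList)).flatten)
        = (((w :: ws).map (fun word =>
          ("[class*='".toList ++ word.toList
            ++ ("']".toList ++ (ignore.map (fun w => ":not([class*='".toList ++ w.toList ++ "'])".toList)).flatten))
            ++ ", ".toList)).flatten) from by simp [List.append_assoc]]
    rw [flatten_sep_eq _ _ (by simp),
      PySem.List.slice_to_neg_ofNat _ 2 (by omega),
      List.length_append, List.take_left' (by simp),
      intercalate_map_wrap]
    simp [List.append_assoc]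

-- ===== VERDICT (by name: the statement is the Claim_ definition above) =====
theorem build_css_selector_spec : Claim_equal_build_css_selector := by
  intro important ignore _
  unfold Spec_build_css_selector
  exact build_css_selector_eq important ignore
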